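-- pv_equiv track=rewrite | github.com/ZoeLoveHGJ/Project_BGCT | Tool copy.py | get_collision_info
-- ===== SOURCE A (Python) =====
-- from typing import Dict, List, Any, Tuple, Optional
--
-- def get_collision_info(tag_ids: List[str]) -> Tuple[str, List[int]]:
--     """
--     计算一组标签ID的公共前缀和所有碰撞位的位置 (理想逻辑)。
--
--     Args:
--         tag_ids (List[str]): 待分析的标签ID列表。
--
--     Returns:
--         Tuple[str, List[int]]: (公共前缀, 碰撞位索引列表)。
--     """
--     if not tag_ids:
--         return '', []
--     if len(tag_ids) == 1:
--         return tag_ids[0], []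
--
--     # 确保所有ID长度相同，取最短的作为安全边界
--     min_len = min(len(tid) for tid in tag_ids)
--
--     # 计算公共前缀
--     prefix = ""
--     for i in range(min_len):
--         first_bit = tag_ids[0][i]
--         if all(tid[i] == first_bit for tid in tag_ids):
--             prefix += first_bit
--         else:
--             break
--
--     # 从公共前缀之后开始，查找所有发生碰撞的比特位
--     collision_positions = []
--     for i in range(len(prefix), min_len):
--         bits_at_pos = {tid[i] for tid in tag_ids}
--         if len(bits_at_pos) > 1:
--             collision_positions.append(i)
--
--     return prefix, collision_positions
-- ===== SOURCE B (Python) =====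
-- from typing import List, Tuple
--
-- def get_collision_info(tag_ids: List[str]) -> Tuple[str, List[int]]:
--     if not tag_ids:
--         return '', []
--     if len(tag_ids) == 1:
--         return tag_ids[0], []
--     prefix_chars = []
--     collision_positions = []
--     seen_collision = False
--     for i, col in enumerate(zip(*tag_ids)):
--         if len(set(col)) > 1:
--             seen_collision = True
--             collision_positions.append(i)
--         elif not seen_collision:
--             prefix_chars.append(col[0])
--     return ''.join(prefix_chars), collision_positions
-- ===== Notes on version B (the rewrite author's own statement) =====
-- stated objective: simpler
-- what changed: A's two phases of per-position rescans over all ids (a prefix loop with all(), then a second indexed loop rebuilding a set per position) are replaced by one transposition (zip(*tag_ids)) and a single fold over the columns carrying (prefix_chars, collision_positions, seen_collision).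
import Mathlib
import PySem

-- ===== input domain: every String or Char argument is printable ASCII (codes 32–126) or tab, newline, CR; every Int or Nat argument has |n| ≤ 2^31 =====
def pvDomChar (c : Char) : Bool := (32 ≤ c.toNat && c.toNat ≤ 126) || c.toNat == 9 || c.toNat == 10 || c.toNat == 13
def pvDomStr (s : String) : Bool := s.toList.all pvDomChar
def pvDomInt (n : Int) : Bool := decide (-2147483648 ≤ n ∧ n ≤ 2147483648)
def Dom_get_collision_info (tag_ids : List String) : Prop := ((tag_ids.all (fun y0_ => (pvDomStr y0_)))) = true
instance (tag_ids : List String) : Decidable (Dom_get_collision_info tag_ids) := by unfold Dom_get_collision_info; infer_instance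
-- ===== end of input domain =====

-- B replaces A's nested per-position rescans (prefix loop + collision loop, each scanning all ids)
-- by one transposition into columns and a single fold over the columns; objective: simpler single pass.

-- ===== PORT A =====
-- A's prefix loop: 'for i in range(min_len): … else: break' as recursion over the index list.
-- Indices produced by range(min_len) are always in range of every id (min_len is the minimum
-- length), so the total pyGetD with an arbitrary default is exact here.
def aPrefixLoop (cs : List (List Char)) (c0 : List Char) : List Int → List Char → List Char
  | [], pref => pref
  | i :: is, pref =>
      let first_bit := PySem.List.pyGetD c0 i ' '
      if cs.all (fun tid => PySem.List.pyGetD tid i ' ' == first_bit) then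
        aPrefixLoop cs c0 is (pref ++ [first_bit])
      else pref

def get_collision_info (tag_ids : List String) : String × List Int :=
  if tag_ids.length = 0 then ("", [])
  else if tag_ids.length = 1 then (tag_ids.headD "", [])
  else
    let cs := tag_ids.map String.toList
    let lens := cs.map List.length
    -- min(len(tid) for tid in tag_ids): Python min of a nonempty sequence (headD default unreachable)
    let min_len := lens.foldl Nat.min (lens.headD 0)
    let c0 := cs.headD []
    let prefx := aPrefixLoop cs c0 (PySem.List.pyRange 0 (min_len : Int) 1) []
    let colls := (PySem.List.pyRange (prefx.length : Int) (min_len : Int) 1).foldl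
      (fun acc i =>
        let bits : PySem.Set Char := PySem.Set.ofList (cs.map (fun tid => PySem.List.pyGetD tid i ' '))
        if 1 < bits.length then acc ++ [i] else acc) []
    (String.ofList prefx, colls)

-- ===== PORT B =====
-- zip(*tag_ids): the per-position columns, truncated at the shortest id.
def bColumns (cs : List (List Char)) : List (List Char) :=
  if h : cs ≠ [] ∧ cs.all (fun c => !c.isEmpty) then
    cs.map (fun c => c.headD ' ') :: bColumns (cs.map (fun c => c.tail))
  else []
termination_by (cs.headD []).length
decreasing_by
  obtain ⟨h1, h2⟩ := h
  match cs, h1 with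
  | c :: cs', _ =>
    have hc : c ≠ [] := by
      have := List.all_eq_true.mp h2 c (by simp)
      simpa [List.isEmpty_iff] using this
    cases c with
    | nil => exact absurd rfl hc
    | cons a as => simp

-- loop body of B's single pass: state (prefix_chars, collision_positions, seen_collision)
def bStep (st : List Char × List Int × Bool) (ic : Int × List Char) : List Char × List Int × Bool :=
  if 1 < (PySem.Set.ofList ic.2).length then (st.1, st.2.1 ++ [ic.1], true)
  else if !st.2.2 then (st.1 ++ [ic.2.headD ' '], st.2.1, st.2.2)
  else st

def get_collision_info_alt (tag_ids : List String) : String × List Int :=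
  if tag_ids.length = 0 then ("", [])
  else if tag_ids.length = 1 then (tag_ids.headD "", [])
  else
    let cols := bColumns (tag_ids.map String.toList)
    let res := (PySem.List.enumerate cols 0).foldl bStep ([], [], false)
    (String.ofList res.1, res.2.1)

-- ===== PRECONDITION & SPEC =====
def Spec_get_collision_info (tag_ids : List String) (out : String × List Int) : Prop := out = get_collision_info_alt tag_ids
instance (tag_ids : List String) (out : String × List Int) : Decidable (Spec_get_collision_info tag_ids out) := by unfold Spec_get_collision_info; infer_instance

-- ===== CLAIM (what is proved, stated in full; the proofs are below) =====
def Claim_equal_get_collision_info : Prop := ∀ (tag_ids : List String), Dom_get_collision_info tag_ids → Spec_get_collision_info tag_ids (get_collision_info tag_ids)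

-- ===== LEMMAS AND PROOFS =====

-- min(len …): characterisation of the foldl-min in port A
theorem foldl_min_le (l : List Nat) (a : Nat) :
    l.foldl Nat.min a ≤ a ∧ ∀ x ∈ l, l.foldl Nat.min a ≤ x := by
  induction l generalizing a with
  | nil => simp
  | cons y ys ih =>
    obtain ⟨h1, h2⟩ := ih (Nat.min a y)
    refine ⟨le_trans h1 (Nat.min_le_left _ _), ?_⟩
    intro x hx
    rcases List.mem_cons.mp hx with rfl | hx
    · exact le_trans h1 (Nat.min_le_right _ _)
    · exact h2 x hx

theorem foldl_min_mem (l : List Nat) (a : Nat) :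
    l.foldl Nat.min a = a ∨ l.foldl Nat.min a ∈ l := by
  induction l generalizing a with
  | nil => simp
  | cons y ys ih =>
    rw [List.foldl_cons]
    rcases ih (Nat.min a y) with h | h
    · by_cases hm : a ≤ y
      · left; rw [h]; exact Nat.min_eq_left hm
      · right
        have hy : a.min y = y := Nat.min_eq_right (Nat.le_of_not_le hm)
        rw [h, hy]; exact List.mem_cons_self
    · right; exact List.mem_cons_of_mem _ h

-- the min-length expression of port A, as a named function for the lemmas
def minLen (cs : List (List Char)) : Nat :=
  (cs.map List.length).foldl Nat.min ((cs.map List.length).headD 0)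

theorem minLen_le {cs : List (List Char)} {c : List Char} (hc : c ∈ cs) :
    minLen cs ≤ c.length := by
  exact (foldl_min_le _ _).2 _ (List.mem_map_of_mem hc)

theorem minLen_mem (cs : List (List Char)) (h : cs ≠ []) :
    ∃ c ∈ cs, minLen cs = c.length := by
  rcases foldl_min_mem (cs.map List.length) ((cs.map List.length).headD 0) with h1 | h1
  · cases cs with
    | nil => exact absurd rfl h
    | cons c cs' => exact ⟨c, by simp, by simpa [minLen] using h1⟩
  · rcases List.mem_map.mp h1 with ⟨c, hc, hlen⟩
    exact ⟨c, hc, hlen.symm⟩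

-- the i-th column of the id matrix (total getD form; exact for i below every length)
def colAt (cs : List (List Char)) (i : Nat) : List Char := cs.map (fun c => c.getD i ' ')

theorem tail_getD (c : List Char) (i : Nat) : c.tail.getD i ' ' = c.getD (i+1) ' ' := by
  cases c <;> simp

theorem headD_getD (c : List Char) : c.headD ' ' = c.getD 0 ' ' := by
  cases c <;> simp

-- B's zip(*tag_ids) produces exactly the columns 0 .. minLen-1
theorem bColumns_eq (n : Nat) : ∀ (cs : List (List Char)), cs ≠ [] → (cs.headD []).length ≤ n →
    bColumns cs = (List.range (minLen cs)).map (colAt cs) := by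
  induction n with
  | zero =>
    intro cs hne hlen
    cases cs with
    | nil => exact absurd rfl hne
    | cons c cs' =>
      have hc : c = [] := by simpa using List.length_eq_zero_iff.mp (Nat.le_zero.mp hlen)
      subst hc
      have hmin : minLen ([] :: cs') = 0 := by
        have := minLen_le (cs := [] :: cs') (c := []) (by simp)
        simpa using this
      rw [bColumns, dif_neg (by simp), hmin]
      simp
  | succ n ih =>
    intro cs hne hlen
    cases cs with
    | nil => exact absurd rfl hne
    | cons c cs' =>
      by_cases hall : (c :: cs').all (fun x => !x.isEmpty)
      · -- every id still nonempty: one column, recurse on the tails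
        have hcne : c ≠ [] := by
          have := List.all_eq_true.mp hall c (by simp)
          simpa [List.isEmpty_iff] using this
        rw [bColumns]
        rw [dif_pos ⟨by simp, hall⟩]
        have htne : (c :: cs').map List.tail ≠ [] := by simp
        have htlen : (((c :: cs').map List.tail).headD []).length ≤ n := by
          cases c with
          | nil => exact absurd rfl hcne
          | cons a as => simpa using Nat.lt_succ_iff.mp (by simpa using hlen)
        rw [ih _ htne htlen]
        -- minLen of the tails is minLen - 1, and minLen ≥ 1
        have h1 : 1 ≤ minLen (c :: cs') := by
          obtain ⟨d, hd, hdl⟩ := minLen_mem (c :: cs') (by simp)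
          have hdne : d ≠ [] := by
            have := List.all_eq_true.mp hall d hd
            simpa [List.isEmpty_iff] using this
          have : d.length ≠ 0 := by simpa [List.length_eq_zero_iff] using hdne
          omega
        have hmt : minLen ((c :: cs').map List.tail) = minLen (c :: cs') - 1 := by
          apply Nat.le_antisymm
          · obtain ⟨d, hd, hdl⟩ := minLen_mem (c :: cs') (by simp)
            have := minLen_le (cs := (c :: cs').map List.tail) (c := d.tail)
              (List.mem_map_of_mem hd)
            simpa [hdl] using this
          · obtain ⟨t, ht, htl⟩ := minLen_mem ((c :: cs').map List.tail) (by simp)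
            rcases List.mem_map.mp ht with ⟨d, hd, rfl⟩
            have := minLen_le (cs := c :: cs') hd
            rw [htl, List.length_tail]
            omega
        obtain ⟨k, hk⟩ : ∃ k, minLen (c :: cs') = k + 1 :=
          ⟨minLen (c :: cs') - 1, by omega⟩
        rw [hmt, hk]
        simp only [Nat.add_sub_cancel, List.range_succ_eq_map, List.map_cons, List.map_map]
        congr 1
        · simp only [colAt, List.map_cons]
          congr 1
          · exact headD_getD c
          · exact List.map_congr_left (fun x _ => headD_getD x)
        · apply List.map_congr_left
          intro i _
          simp only [Function.comp_apply, colAt, List.map_cons, List.map_map]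
          congr 1
          · simpa [Nat.succ_eq_add_one] using tail_getD c i
          · exact List.map_congr_left
              (fun x _ => by simpa [Nat.succ_eq_add_one] using tail_getD x i)
      · -- some id is exhausted: zip stops, and minLen is 0
        rw [bColumns, dif_neg (by simp [hall])]
        simp only [List.all_eq_true, Bool.not_eq_eq_eq_not, Bool.not_true] at hall
        push_neg at hall
        obtain ⟨d, hd, hde⟩ := hall
        have hd0 : d.length = 0 := by
          rcases d with _ | _ <;> simp_all [List.isEmpty_iff]
        have hmin : minLen (c :: cs') = 0 := by
          have := minLen_le (cs := c :: cs') hd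
          omega
        simp [hmin]

-- 'len(set(col)) > 1' on a nonempty column says: some element differs from the first
theorem set_card_gt_one (x : Char) (xs : List Char) :
    1 < (PySem.Set.ofList (x :: xs)).length ↔ ¬ (xs.all (fun y => y == x) = true) := by
  rw [PySem.Set.ofList_cons]
  constructor
  · intro hlen hall
    have hnil : (PySem.Set.ofList xs).discard x = [] := by
      rw [List.eq_nil_iff_forall_not_mem]
      intro y hy
      rcases (PySem.Set.mem_discard _ _ _).mp hy with ⟨hy1, hy2⟩
      have := List.all_eq_true.mp hall y ((PySem.Set.mem_ofList _ _).mp hy1)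
      exact hy2 (by simpa using this)
    simp [hnil] at hlen
  · intro hall
    simp only [List.all_eq_true, beq_iff_eq] at hall
    push_neg at hall
    obtain ⟨y, hy, hyx⟩ := hall
    have hmem : y ∈ (PySem.Set.ofList xs).discard x :=
      (PySem.Set.mem_discard _ _ _).mpr ⟨(PySem.Set.mem_ofList _ _).mpr hy, hyx⟩
    rcases h : (PySem.Set.ofList xs).discard x with _ | ⟨a, as⟩
    · simp [h] at hmem
    · simp

-- boolean form of the previous lemma
theorem set_card_gt_one_bool (x : Char) (xs : List Char) :
    decide (1 < (PySem.Set.ofList (x :: xs)).length) = !xs.all (fun y => y == x) := by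
  have h := set_card_gt_one x xs
  cases hxs : xs.all (fun y => y == x)
  · simp only [Bool.not_false]
    exact decide_eq_true (h.mpr (by simp [hxs]))
  · simp only [Bool.not_true]
    exact decide_eq_false (fun hl => (h.mp hl) hxs)

-- the column-wise collision test, as a named predicate
def collB (cs : List (List Char)) (i : Nat) : Bool :=
  decide (1 < (PySem.Set.ofList (colAt cs i)).length)

-- A's per-position 'all(tid[i] == first_bit …)' is the negation of B's 'len(set(col)) > 1'
theorem collB_cons (c0 : List Char) (cs' : List (List Char)) (i : Nat) :
    collB (c0 :: cs') i = !((c0 :: cs').all (fun c => c.getD i ' ' == c0.getD i ' ')) := by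
  unfold collB
  simp only [colAt, List.map_cons]
  refine (set_card_gt_one_bool _ _).trans ?_
  simp [List.all_map, List.all_cons, Function.comp_def]

-- A's prefix loop is a takeWhile over the indices
theorem aPrefixLoop_eq (cs : List (List Char)) (c0 : List Char) :
    ∀ (l : List Nat) (pref : List Char),
      aPrefixLoop cs c0 (l.map Int.ofNat) pref
        = pref ++ (l.takeWhile (fun i => cs.all (fun c => c.getD i ' ' == c0.getD i ' '))).map
            (fun i => c0.getD i ' ') := by
  intro l
  induction l with
  | nil => intro pref; simp [aPrefixLoop]
  | cons i is ih =>
    intro pref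
    simp only [List.map_cons, aPrefixLoop, Int.ofNat_eq_natCast, PySem.List.pyGetD_natCast]
    by_cases hc : cs.all (fun c => c.getD i ' ' == c0.getD i ' ')
    · rw [if_pos hc, ih,
        List.takeWhile_cons_of_pos
          (p := fun i => cs.all fun c => c.getD i ' ' == c0.getD i ' ') hc]
      simp
    · rw [if_neg hc,
        List.takeWhile_cons_of_neg
          (p := fun i => cs.all fun c => c.getD i ' ' == c0.getD i ' ') hc]
      simp

-- enumerate over a mapped index block keeps the indices
theorem enumerate_range'_map (f : Nat → List Char) :
    ∀ (k a : Nat),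
      PySem.List.enumerate ((List.range' a k).map f) (Int.ofNat a)
        = (List.range' a k).map (fun i => (Int.ofNat i, f i)) := by
  intro k
  induction k with
  | zero => intro a; simp [PySem.List.enumerate]
  | succ k ih =>
    intro a
    rw [List.range'_succ]
    simp only [List.map_cons, PySem.List.enumerate_cons]
    have hc : (Int.ofNat a + 1) = Int.ofNat (a + 1) := by simp
    rw [hc, ih (a + 1)]

-- B's fold once a collision has been seen: only collects collision indices
theorem bFold_true : ∀ (l : List (Int × List Char)) (pref : List Char) (colls : List Int),
    l.foldl bStep (pref, colls, true)
      = (pref, colls ++ (l.filter (fun p => decide (1 < (PySem.Set.ofList p.2).length))).map (·.1), true) := by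
  intro l
  induction l with
  | nil => intro pref colls; simp
  | cons p l ih =>
    intro pref colls
    rw [List.foldl_cons]
    by_cases hp : 1 < (PySem.Set.ofList p.2).length
    · rw [show bStep (pref, colls, true) p = (pref, colls ++ [p.1], true) by
        simp [bStep, hp]]
      rw [ih, List.filter_cons, if_pos (by simpa using hp)]
      simp
    · rw [show bStep (pref, colls, true) p = (pref, colls, true) by
        simp [bStep, hp]]
      rw [ih, List.filter_cons, if_neg (by simpa using hp)]

-- B's fold from the initial state: prefix chars while no collision, then collision indices
theorem bFold_false : ∀ (l : List (Int × List Char)) (pref : List Char) (colls : List Int),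
    l.foldl bStep (pref, colls, false)
      = (pref ++ (l.takeWhile (fun p => !decide (1 < (PySem.Set.ofList p.2).length))).map
            (fun p => p.2.headD ' '),
         colls ++ (l.filter (fun p => decide (1 < (PySem.Set.ofList p.2).length))).map (·.1),
         l.any (fun p => decide (1 < (PySem.Set.ofList p.2).length))) := by
  intro l
  induction l with
  | nil => intro pref colls; simp
  | cons p l ih =>
    intro pref colls
    rw [List.foldl_cons]
    by_cases hp : 1 < (PySem.Set.ofList p.2).length
    · rw [show bStep (pref, colls, false) p = (pref, colls ++ [p.1], true) by
        simp [bStep, hp]]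
      rw [bFold_true, List.filter_cons, if_pos (by simpa using hp),
        List.takeWhile_cons, List.any_cons]
      simp [hp]
    · rw [show bStep (pref, colls, false) p = (pref ++ [p.2.headD ' '], colls, false) by
        simp [bStep, hp]]
      rw [ih, List.filter_cons, if_neg (by simpa using hp),
        List.takeWhile_cons, List.any_cons]
      simp [hp, List.append_assoc]

-- A's collision loop is a filter (specialisation of the append-if loop shape)
theorem aCollLoop_eq (cs : List (List Char)) (l : List Int) :
    l.foldl (fun acc i =>
        if 1 < (PySem.Set.ofList (cs.map (fun tid => PySem.List.pyGetD tid i ' '))).length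
        then acc ++ [i] else acc) []
      = l.filter (fun i =>
          decide (1 < (PySem.Set.ofList (cs.map (fun tid => PySem.List.pyGetD tid i ' '))).length)) := by
  have hb : (fun (acc : List Int) (i : Int) =>
        if 1 < (PySem.Set.ofList (cs.map (fun tid => PySem.List.pyGetD tid i ' '))).length
        then acc ++ [i] else acc)
      = (fun acc i =>
          if (fun i : Int => decide (1 < (PySem.Set.ofList (cs.map (fun tid => PySem.List.pyGetD tid i ' '))).length)) i = true
          then acc ++ [(fun i : Int => i) i] else acc) := by
    funext acc i
    simp
  rw [hb, PySem.List.foldl_append_if]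
  simp

-- the length of a takeWhile never exceeds the list's
theorem length_takeWhile_le' {α : Type} (p : α → Bool) (l : List α) :
    (l.takeWhile p).length ≤ l.length := by
  induction l with
  | nil => simp
  | cons x xs ih =>
    rw [List.takeWhile_cons]
    split <;> simp <;> omega

-- dropWhile is the drop at the takeWhile's length
theorem dropWhile_eq_drop {α : Type} (p : α → Bool) (l : List α) :
    l.dropWhile p = l.drop (l.takeWhile p).length := by
  conv_lhs => rw [← List.drop_left (l₁ := l.takeWhile p) (l₂ := l.dropWhile p)]
  rw [List.takeWhile_append_dropWhile]

-- MAIN: the two ports agree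
theorem main_eq (tag_ids : List String) :
    get_collision_info tag_ids = get_collision_info_alt tag_ids := by
  cases tag_ids with
  | nil => rfl
  | cons t0 rest =>
    cases rest with
    | nil => rfl
    | cons t1 ts =>
      simp only [get_collision_info, get_collision_info_alt, List.length_cons]
      have h0 : ¬ (ts.length + 1 + 1 = 0) := by omega
      have h1 : ¬ (ts.length + 1 + 1 = 1) := by omega
      rw [if_neg h0, if_neg h1, if_neg h0, if_neg h1]
      set cs : List (List Char) := (t0 :: t1 :: ts).map String.toList with hcs
      have hcs' : cs = t0.toList :: (t1.toList :: ts.map String.toList) := by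
        simp [hcs]
      -- the min-length expression is minLen
      rw [show (cs.map List.length).foldl Nat.min ((cs.map List.length).headD 0)
            = minLen cs from rfl]
      -- A's prefix loop
      rw [PySem.List.pyRange_zero_natCast,
        show (fun k : Nat => (k : Int)) = Int.ofNat from rfl,
        aPrefixLoop_eq, List.nil_append]
      set pA : Nat → Bool :=
        (fun i => cs.all fun c => c.getD i ' ' == (cs.headD []).getD i ' ') with hpA
      set T : List Nat := (List.range (minLen cs)).takeWhile pA with hT
      have hdle : T.length ≤ minLen cs := by
        have := length_takeWhile_le' pA (List.range (minLen cs))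
        simpa [hT] using this
      -- A's collision loop
      rw [aCollLoop_eq, List.length_map]
      have hpr : PySem.List.pyRange (T.length : Int) (minLen cs : Int) 1
          = (List.range' T.length (minLen cs - T.length)).map Int.ofNat := by
        rw [PySem.List.pyRange_one, List.range'_eq_map_range, List.map_map]
        rw [show ((minLen cs : Int) - (T.length : Int)).toNat = minLen cs - T.length by omega]
        apply List.map_congr_left
        intro k _
        simp [Function.comp]
      rw [hpr, List.filter_map]
      rw [show ((fun i : Int =>
              decide (1 < (PySem.Set.ofList (cs.map (fun tid => PySem.List.pyGetD tid i ' '))).length))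
            ∘ Int.ofNat) = collB cs by
        funext i
        simp [Function.comp, collB, colAt, Int.ofNat_eq_natCast, PySem.List.pyGetD_natCast]]
      -- B's columns and single fold
      rw [bColumns_eq (cs.headD []).length cs (by simp [hcs']) le_rfl]
      rw [List.range_eq_range', show (0 : Int) = Int.ofNat 0 from rfl,
        enumerate_range'_map, bFold_false, List.nil_append, List.takeWhile_map,
        List.filter_map, List.map_map, List.map_map]
      rw [show ((fun p : Int × List Char => !decide (1 < (PySem.Set.ofList p.2).length))
            ∘ (fun i => (Int.ofNat i, colAt cs i))) = (fun i => !collB cs i) from rfl]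
      rw [show ((fun p : Int × List Char => decide (1 < (PySem.Set.ofList p.2).length))
            ∘ (fun i => (Int.ofNat i, colAt cs i))) = (fun i => collB cs i) from rfl]
      rw [show ((fun p : Int × List Char => p.2.headD ' ')
            ∘ (fun i => (Int.ofNat i, colAt cs i))) = (fun i => (colAt cs i).headD ' ') from rfl]
      rw [show ((fun p : Int × List Char => p.1)
            ∘ (fun i => (Int.ofNat i, colAt cs i))) = (fun i : Nat => Int.ofNat i) from rfl]
      rw [← List.range_eq_range']
      -- the two loop predicates coincide
      have hpred : pA = (fun i => !collB cs i) := by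
        funext i
        rw [hpA, hcs', collB_cons]
        simp
      -- prefixes agree
      have hpref : T.map (fun i => (cs.headD []).getD i ' ')
          = ((List.range (minLen cs)).takeWhile (fun i => !collB cs i)).map
              (fun i => (colAt cs i).headD ' ') := by
        rw [← hpred, ← hT]
        apply List.map_congr_left
        intro i _
        rw [hcs']
        simp [colAt, headD_getD]
      -- collision positions agree
      have hcoll : (List.range' T.length (minLen cs - T.length)).filter (collB cs)
          = (List.range (minLen cs)).filter (collB cs) := by
        have hsplit : T ++ (List.range (minLen cs)).drop T.length = List.range (minLen cs) := by
          rw [hT, ← dropWhile_eq_drop]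
          exact List.takeWhile_append_dropWhile
        have hdrop : (List.range (minLen cs)).drop T.length
            = List.range' T.length (minLen cs - T.length) := by
          rw [List.range_eq_range', List.drop_range']
          simp
        have hTnil : T.filter (collB cs) = [] := by
          rw [List.filter_eq_nil_iff]
          intro a ha
          have := List.mem_takeWhile_imp (hT ▸ ha)
          rw [hpred] at this
          simp at this
          simp [this]
        conv_rhs => rw [← hsplit]
        rw [List.filter_append, hTnil, List.nil_append, hdrop]
      rw [hpref, hcoll]
      simp

-- ===== VERDICT (by name: the statement is the Claim_ definition above) =====
theorem get_collision_info_spec : Claim_equal_get_collision_info := by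
  intro tag_ids _
  exact main_eq tag_ids
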